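-- pv_equiv track=rewrite | github.com/PatOConnor43/PatOConnor43-DailyProgrammer-195-Intermediate | MathDice.py | build_toward_target
-- ===== SOURCE A (Python) =====
-- def build_toward_target(target, scoring_values_copy, answer_list):
--     #base case
--     if len(scoring_values_copy) <= 0:
--         return answer_list
--     else:
--         if sum(answer_list) >= max(scoring_values_copy):
--             answer_list.append(-max(scoring_values_copy))
--             scoring_values_copy.remove(max(scoring_values_copy))
--             return build_toward_target(target, scoring_values_copy, answer_list)
--         if sum(answer_list) < max(scoring_values_copy):
--             answer_list.append(max(scoring_values_copy))
--             scoring_values_copy.remove(max(scoring_values_copy))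
--             return build_toward_target(target, scoring_values_copy, answer_list)
-- ===== SOURCE B (Python) =====
-- def build_toward_target(target, scoring_values_copy, answer_list):
--     s = sum(answer_list)
--     out = list(answer_list)
--     for m in sorted(scoring_values_copy, reverse=True):
--         if s >= m:
--             out.append(-m)
--             s -= m
--         else:
--             out.append(m)
--             s += m
--     return out
-- ===== Notes on version B (the rewrite author's own statement) =====
-- stated objective: faster
-- what changed: Replaces A's recursion that recomputes max(), list.remove() and sum() on every step with one descending sort followed by a single pass that keeps a running sum.
import Mathlib
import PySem

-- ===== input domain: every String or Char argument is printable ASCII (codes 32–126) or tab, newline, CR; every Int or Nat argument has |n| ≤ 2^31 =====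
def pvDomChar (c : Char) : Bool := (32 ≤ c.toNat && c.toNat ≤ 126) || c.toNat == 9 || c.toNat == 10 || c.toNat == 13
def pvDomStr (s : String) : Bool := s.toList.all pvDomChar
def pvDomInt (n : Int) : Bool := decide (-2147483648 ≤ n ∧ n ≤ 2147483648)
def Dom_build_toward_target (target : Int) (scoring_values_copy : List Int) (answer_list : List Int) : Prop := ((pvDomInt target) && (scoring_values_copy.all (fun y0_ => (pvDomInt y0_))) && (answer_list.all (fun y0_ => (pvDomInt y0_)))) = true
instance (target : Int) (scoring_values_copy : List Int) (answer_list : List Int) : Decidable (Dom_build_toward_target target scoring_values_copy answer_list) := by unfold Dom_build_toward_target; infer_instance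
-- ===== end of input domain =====

-- B sorts the values descending once and builds the signed list in one pass with a running sum,
-- instead of A's quadratic recursion (max + remove + re-sum each step); equivalence is about the
-- RETURN value only — A mutates its two list arguments in place, B does not.

-- ===== PORT A =====
-- termination helper for the port: removing the max shortens the list
theorem pv_remove_max_len (svc : List Int) (h : ¬ svc.length ≤ 0) :
    ((PySem.List.remove? svc ((PySem.List.max? svc (fun x => x)).getD 0)).getD []).length < svc.length := by
  have hne : svc ≠ [] := by cases svc <;> simp_all
  obtain ⟨mv, hm⟩ : ∃ mv, PySem.List.max? svc (fun x => x) = some mv := by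
    cases hmx : PySem.List.max? svc (fun x => x) with
    | none => exact absurd ((PySem.List.max?_eq_none_iff svc _).mp hmx) hne
    | some mv => exact ⟨mv, rfl⟩
  have hmem : mv ∈ svc := PySem.List.max?_mem hm
  rw [hm, Option.getD_some, PySem.List.remove?_eq_some_erase svc mv hmem, Option.getD_some,
    List.length_erase_of_mem hmem]
  omega

def build_toward_target (target : Int) (scoring_values_copy : List Int) (answer_list : List Int) : List Int :=
  if h : scoring_values_copy.length ≤ 0 then
    answer_list
  else
    let m := (PySem.List.max? scoring_values_copy (fun x => x)).getD 0
    let svc' := (PySem.List.remove? scoring_values_copy m).getD []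
    if answer_list.sum ≥ m then
      build_toward_target target svc' (answer_list ++ [-m])
    else
      build_toward_target target svc' (answer_list ++ [m])
termination_by scoring_values_copy.length
decreasing_by
  · exact pv_remove_max_len scoring_values_copy h
  · exact pv_remove_max_len scoring_values_copy h

-- ===== PORT B =====
def build_toward_target_alt (target : Int) (scoring_values_copy : List Int) (answer_list : List Int) : List Int :=
  ((PySem.List.sorted scoring_values_copy (fun x => x) true).foldl
    (fun (st : Int × List Int) m =>
      if st.1 ≥ m then (st.1 - m, st.2 ++ [-m]) else (st.1 + m, st.2 ++ [m]))
    (answer_list.sum, answer_list)).2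

-- ===== PRECONDITION & SPEC =====
def Spec_build_toward_target (target : Int) (scoring_values_copy : List Int) (answer_list : List Int) (out : List Int) : Prop := out = build_toward_target_alt target scoring_values_copy answer_list
instance (target : Int) (scoring_values_copy : List Int) (answer_list : List Int) (out : List Int) : Decidable (Spec_build_toward_target target scoring_values_copy answer_list out) := by unfold Spec_build_toward_target; infer_instance

-- ===== CLAIM (what is proved, stated in full; the proofs are below) =====
def Claim_equal_build_toward_target : Prop := ∀ (target : Int) (scoring_values_copy : List Int) (answer_list : List Int), Dom_build_toward_target target scoring_values_copy answer_list → Spec_build_toward_target target scoring_values_copy answer_list (build_toward_target target scoring_values_copy answer_list)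

-- ===== LEMMAS AND PROOFS =====

-- any non-increasing rearrangement of xs is sorted(xs, reverse=True)
theorem pv_sorted_rev_id_eq (xs ys : List Int) (hp : ys.Perm xs)
    (hpw : ys.Pairwise (fun a b => b ≤ a)) :
    PySem.List.sorted xs (fun x => x) true = ys := by
  have h1 : PySem.List.sorted xs (fun x => x) false = ys.reverse := by
    have := PySem.List.sorted_id_eq_of_perm_of_pairwise xs ys.reverse
      (ys.reverse_perm.trans hp) (by simpa [List.pairwise_reverse] using hpw)
    simpa using this
  have h2 : PySem.List.sorted xs (fun x => x) true =
      (PySem.List.sorted xs (fun x => x) false).reverse := by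
    apply List.reverse_injective
    rw [List.reverse_reverse]
    exact PySem.List.sorted_id_eq_of_perm_of_pairwise xs _
      ((PySem.List.sorted xs (fun x => x) true).reverse_perm.trans
        (PySem.List.sorted_perm xs (fun x => x) true))
      (by simpa [List.pairwise_reverse] using PySem.List.sorted_pairwise_rev xs (fun x => x)) |>.symm
  rw [h2, h1, List.reverse_reverse]

-- peeling the max off the front of the descending sort
theorem pv_sorted_rev_cons (svc : List Int) {mv : Int}
    (hm : PySem.List.max? svc (fun x => x) = some mv) :
    PySem.List.sorted svc (fun x => x) true =
      mv :: PySem.List.sorted (svc.erase mv) (fun x => x) true := by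
  have hmem : mv ∈ svc := PySem.List.max?_mem hm
  apply pv_sorted_rev_id_eq
  · exact ((PySem.List.sorted_perm (svc.erase mv) (fun x => x) true).cons mv).trans
      (List.perm_cons_erase hmem).symm
  · refine List.pairwise_cons.mpr ⟨?_, PySem.List.sorted_pairwise_rev _ _⟩
    intro a ha
    have : a ∈ svc.erase mv := ((PySem.List.sorted_perm (svc.erase mv) (fun x => x) true).mem_iff).mp ha
    exact PySem.List.max?_isMax hm a (List.mem_of_mem_erase this)

theorem pv_equal (n : Nat) : ∀ (svc : List Int), svc.length ≤ n →
    ∀ (target : Int) (ans : List Int),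
      build_toward_target target svc ans = build_toward_target_alt target svc ans := by
  induction n with
  | zero =>
    intro svc hlen target ans
    have hnil : svc = [] := List.length_eq_zero_iff.mp (Nat.le_zero.mp hlen)
    subst hnil
    simp [build_toward_target, build_toward_target_alt, PySem.List.sorted]
  | succ k ih =>
    intro svc hlen target ans
    by_cases hz : svc.length ≤ 0
    · have hnil : svc = [] := by cases svc <;> simp_all
      subst hnil
      simp [build_toward_target, build_toward_target_alt, PySem.List.sorted]
    · have hne : svc ≠ [] := by cases svc <;> simp_all
      obtain ⟨mv, hm⟩ : ∃ mv, PySem.List.max? svc (fun x => x) = some mv := by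
        cases hmx : PySem.List.max? svc (fun x => x) with
        | none => exact absurd ((PySem.List.max?_eq_none_iff svc _).mp hmx) hne
        | some mv => exact ⟨mv, rfl⟩
      have hmem : mv ∈ svc := PySem.List.max?_mem hm
      have hrm : (PySem.List.remove? svc mv).getD [] = svc.erase mv := by
        rw [PySem.List.remove?_eq_some_erase svc mv hmem, Option.getD_some]
      have hlen' : (svc.erase mv).length ≤ k := by
        rw [List.length_erase_of_mem hmem]; omega
      rw [build_toward_target]
      simp only [hz, dite_false, hm, Option.getD_some, hrm]
      unfold build_toward_target_alt
      rw [pv_sorted_rev_cons svc hm]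
      simp only [List.foldl_cons]
      by_cases hge : ans.sum ≥ mv
      · rw [if_pos hge, ih (svc.erase mv) hlen' target (ans ++ [-mv])]
        unfold build_toward_target_alt
        simp [List.sum_append, sub_eq_add_neg, ge_iff_le, hge]
      · rw [if_neg hge, ih (svc.erase mv) hlen' target (ans ++ [mv])]
        unfold build_toward_target_alt
        simp [List.sum_append, ge_iff_le, hge]

-- ===== VERDICT (by name: the statement is the Claim_ definition above) =====
theorem build_toward_target_spec : Claim_equal_build_toward_target := by
  intro target svc ans _
  unfold Spec_build_toward_target
  exact pv_equal svc.length svc le_rfl target ans
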